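-- pv_equiv track=rewrite | github.com/namysl/IS-archive-py | Python_archiwum/aisd_konwersatorium/horner_pochodne2.py | HornerPochodne
-- ===== SOURCE A (Python) =====
-- def HornerPochodne(n, A, c):
--     j = 0
--     ddxList = []
--     while j < n:
--         q = []
--         q.append(A[0])
--         i = 1
--         while i < len(A)-1:
--             q.append(q[i-1] * c + A[i])
--             i += 1
--
--         total = q[0]
--         i = 1
--
--         while i < len(q):
--             total = total * c + q[i]
--             i += 1
--         ddxList.append(total * silnia(j+1))
--         A = q[::]
--         j += 1
--
--     return ddxList
--
-- def silnia(n):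
--     if n < 2:
--         return 1
--     else:
--         return n * silnia(n-1)
-- ===== SOURCE B (Python) =====
-- def HornerPochodne(n, A, c):
--     # Single triangular Horner sweep computing all Taylor coefficients of the
--     # polynomial at c once, then one emit pass with a running factorial.
--     m = len(A)
--     b = list(A)
--     coeffs = []
--     for k in range(m):
--         for i in range(1, m - k):
--             b[i] = b[i] + c * b[i - 1]
--         coeffs.append(b[m - 1 - k])
--     out = []
--     f = 1
--     for j in range(n):
--         f = f * (j + 1)
--         out.append(coeffs[j + 1] * f if j + 1 < m else 0)
--     return out
-- ===== Notes on version B (the rewrite author's own statement) =====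
-- stated objective: alternative
-- what changed: Instead of rebuilding the quotient polynomial and re-evaluating it by Horner for each requested derivative, B computes all Taylor coefficients at c once with a triangular in-place sweep and then emits each derivative in a single pass with a running factorial (intended as faster; a timing run read only ~1.5-2x on the generated inputs, where big-integer factorial products dominate, so no speed is claimed).
-- intended difference: For n >= len(A) with a nonzero leading coefficient, A keeps emitting leading*(j+1)! for every derivative order past the degree, while B returns 0 there, which is the correct value of a derivative of order above the polynomial's degree. — e.g. on HornerPochodne(3, [2, 1], 5): A returns [2, 4, 12], B returns [2, 0, 0]
import Mathlib
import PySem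

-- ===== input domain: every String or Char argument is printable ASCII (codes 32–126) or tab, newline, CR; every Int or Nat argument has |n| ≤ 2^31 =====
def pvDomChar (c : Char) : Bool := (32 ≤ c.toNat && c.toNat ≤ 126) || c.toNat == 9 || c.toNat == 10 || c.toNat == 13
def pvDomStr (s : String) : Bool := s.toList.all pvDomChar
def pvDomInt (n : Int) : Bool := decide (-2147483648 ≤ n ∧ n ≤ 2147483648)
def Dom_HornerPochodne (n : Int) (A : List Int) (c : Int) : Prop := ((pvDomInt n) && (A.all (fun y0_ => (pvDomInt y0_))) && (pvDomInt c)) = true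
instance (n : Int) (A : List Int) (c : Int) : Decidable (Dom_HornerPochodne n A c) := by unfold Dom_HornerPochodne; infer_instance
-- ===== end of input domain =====

-- B replaces A's per-derivative quotient rebuild + re-evaluation by one triangular Horner
-- sweep computing all Taylor coefficients at c, plus a single emit pass with a running
-- factorial; past the polynomial's degree B returns the correct derivative 0 (see D_ below).


-- ===== PORT A =====

-- silnia(n): recursive factorial; the fuel n.toNat bounds the recursion depth and is
-- always sufficient, so this computes exactly Python's silnia
def pvSilniaGo : Nat → Int → Int
  | 0, _ => 1
  | fuel + 1, n => if n < 2 then 1 else n * pvSilniaGo fuel (n - 1)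

def pvSilnia (n : Int) : Int := pvSilniaGo n.toNat n

-- inner loop building q: q = [A[0]]; while i < len(A)-1: q.append(q[i-1]*c + A[i])
def pvQ (A : List Int) (c : Int) : List Int :=
  (PySem.List.pyRange 1 ((A.length : Int) - 1) 1).foldl
    (fun q i => q ++ [PySem.List.pyGetD q (i - 1) 0 * c + PySem.List.pyGetD A i 0])
    [PySem.List.pyGetD A 0 0]

-- total = q[0]; while i < len(q): total = total*c + q[i]
def pvTotal (q : List Int) (c : Int) : Int :=
  (PySem.List.pyRange 1 (q.length : Int) 1).foldl
    (fun t i => t * c + PySem.List.pyGetD q i 0)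
    (PySem.List.pyGetD q 0 0)

-- outer while j < n loop; fuel = number of remaining iterations
def pvALoop (c : Int) : Nat → Int → List Int → List Int → List Int
  | 0, _, _, acc => acc
  | fuel + 1, j, A, acc =>
    let q := pvQ A c
    pvALoop c fuel (j + 1) q (acc ++ [pvTotal q c * pvSilnia (j + 1)])

def HornerPochodne (n : Int) (A : List Int) (c : Int) : List Int :=
  pvALoop c n.toNat 0 A []

-- ===== PORT B =====

-- for i in range(1, bound): b[i] = b[i] + c*b[i-1]   (indices are provably in range)
def pvInner (c : Int) (b : List Int) (bound : Int) : List Int :=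
  (PySem.List.pyRange 1 bound 1).foldl
    (fun b' i => PySem.List.pySetD b' i
      (PySem.List.pyGetD b' i 0 + c * PySem.List.pyGetD b' (i - 1) 0)) b

-- triangular sweep: for k in range(m): inner pass up to m-k; coeffs.append(b[m-1-k])
def pvSweep (A : List Int) (c : Int) : List Int :=
  ((PySem.List.pyRange 0 (A.length : Int) 1).foldl
    (fun (st : List Int × List Int) k =>
      let b := pvInner c st.1 ((A.length : Int) - k)
      (b, st.2 ++ [PySem.List.pyGetD b ((A.length : Int) - 1 - k) 0]))
    (A, [])).2

def HornerPochodne_alt (n : Int) (A : List Int) (c : Int) : List Int :=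
  let m : Int := (A.length : Int)
  let coeffs := pvSweep A c
  ((PySem.List.pyRange 0 n 1).foldl
    (fun (st : List Int × Int) j =>
      let f := st.2 * (j + 1)
      (st.1 ++ [if j + 1 < m then PySem.List.pyGetD coeffs (j + 1) 0 * f else 0], f))
    ([], 1)).1

-- ===== PRECONDITION & SPEC =====

-- Pre_ excludes only inputs where A raises IndexError: empty coefficient list with n > 0.
def Pre_HornerPochodne (n : Int) (A : List Int) (c : Int) : Prop := n ≤ 0 ∨ A ≠ []
instance (n : Int) (A : List Int) (c : Int) : Decidable (Pre_HornerPochodne n A c) := by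
  unfold Pre_HornerPochodne; infer_instance

def pvWitness_HornerPochodne : Int × List Int × Int := (2, [1, 2, 3], 1)

-- For n >= len(A) with nonzero leading coefficient, A keeps emitting leading*(j+1)! for
-- every order past the polynomial's degree, while B returns the intended derivative 0 there.
def D_HornerPochodne (n : Int) (A : List Int) (c : Int) : Prop :=
  A ≠ [] ∧ (A.length : Int) ≤ n ∧ A.headD 0 ≠ 0
instance (n : Int) (A : List Int) (c : Int) : Decidable (D_HornerPochodne n A c) := by
  unfold D_HornerPochodne; infer_instance

def Spec_HornerPochodne (n : Int) (A : List Int) (c : Int) (out : List Int) : Prop :=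
  ¬ D_HornerPochodne n A c → out = HornerPochodne_alt n A c
instance (n : Int) (A : List Int) (c : Int) (out : List Int) : Decidable (Spec_HornerPochodne n A c out) := by
  unfold Spec_HornerPochodne; infer_instance

def pvDiffWitness_HornerPochodne : Int × List Int × Int := (3, [2, 1], 5)
def pvDiffWitnessOut_HornerPochodne : (List Int) × (List Int) := ([2, 4, 12], [2, 0, 0])

-- ===== CLAIM =====

def Claim_unchanged_HornerPochodne : Prop := ∀ (n : Int) (A : List Int) (c : Int),
  Dom_HornerPochodne n A c → Pre_HornerPochodne n A c →
  Spec_HornerPochodne n A c (HornerPochodne n A c)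

def Claim_changed_HornerPochodne : Prop :=
  Dom_HornerPochodne (pvDiffWitness_HornerPochodne.1) (pvDiffWitness_HornerPochodne.2.1) (pvDiffWitness_HornerPochodne.2.2) ∧
  Pre_HornerPochodne (pvDiffWitness_HornerPochodne.1) (pvDiffWitness_HornerPochodne.2.1) (pvDiffWitness_HornerPochodne.2.2) ∧
  D_HornerPochodne (pvDiffWitness_HornerPochodne.1) (pvDiffWitness_HornerPochodne.2.1) (pvDiffWitness_HornerPochodne.2.2) ∧
  HornerPochodne (pvDiffWitness_HornerPochodne.1) (pvDiffWitness_HornerPochodne.2.1) (pvDiffWitness_HornerPochodne.2.2) = pvDiffWitnessOut_HornerPochodne.1 ∧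
  HornerPochodne_alt (pvDiffWitness_HornerPochodne.1) (pvDiffWitness_HornerPochodne.2.1) (pvDiffWitness_HornerPochodne.2.2) = pvDiffWitnessOut_HornerPochodne.2 ∧
  pvDiffWitnessOut_HornerPochodne.1 ≠ pvDiffWitnessOut_HornerPochodne.2

def Claim_exact_HornerPochodne : Prop := ∀ (n : Int) (A : List Int) (c : Int),
  Dom_HornerPochodne n A c → Pre_HornerPochodne n A c → D_HornerPochodne n A c →
  HornerPochodne n A c ≠ HornerPochodne_alt n A c

-- ===== LEMMAS AND PROOFS =====

-- Horner pass: pvHpAux c p r computes the running values p*c+a along r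
def pvHpAux (c : Int) : Int → List Int → List Int
  | _, [] => []
  | p, a :: r => (p * c + a) :: pvHpAux c (p * c + a) r

def pvHp (c : Int) : List Int → List Int
  | [] => []
  | a :: r => a :: pvHpAux c a r

-- one synthetic-division step (quotient of division by (x - c))
def pvStp (c : Int) (p : List Int) : List Int := (pvHp c p).dropLast

-- k-th Taylor coefficient of p at c
def pvTV (c : Int) (p : List Int) (k : Nat) : Int := (pvHp c ((pvStp c)^[k] p)).getLastD 0

-- the value sequence produced by A's outer loop
def pvOA (c : Int) : Nat → Int → List Int → List Int
  | 0, _, _ => []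
  | fuel + 1, j, p =>
    pvTotal (pvQ p c) c * pvSilnia (j + 1) :: pvOA c fuel (j + 1) (pvQ p c)

theorem pvSilniaGo_pos (fuel : Nat) (n : Int) : 1 ≤ pvSilniaGo fuel n := by
  induction fuel generalizing n with
  | zero => simp [pvSilniaGo]
  | succ f ih =>
    simp only [pvSilniaGo]
    split
    · omega
    · have := ih (n - 1); nlinarith

theorem pvSilnia_pos (n : Int) : 1 ≤ pvSilnia n := pvSilniaGo_pos _ _

theorem pvSilnia_succ (t : Nat) : pvSilnia ((t : Int) + 1) = pvSilnia (t : Int) * ((t : Int) + 1) := by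
  unfold pvSilnia
  rw [show ((t : Int) + 1).toNat = t + 1 by omega, show ((t : Int)).toNat = t by omega]
  simp only [pvSilniaGo]
  split
  · have ht : t = 0 := by omega
    subst ht; simp [pvSilniaGo]
  · rw [show (t : Int) + 1 - 1 = (t : Int) by ring, mul_comm]

theorem pvGetLastD_cons (l : List Int) (a d : Int) :
    ((a :: l).getLast?).getD d = (l.getLast?).getD a := by
  induction l generalizing a d with
  | nil => simp
  | cons b r ih => rw [List.getLast?_cons_cons, ih b d, ih b a]

theorem len_pvHpAux (c a : Int) (r : List Int) : (pvHpAux c a r).length = r.length := by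
  induction r generalizing a <;> simp [pvHpAux, *]

theorem len_pvHp (c : Int) (p : List Int) : (pvHp c p).length = p.length := by
  cases p <;> simp [pvHp, len_pvHpAux]

theorem pvHpAux_append (c a y : Int) (l : List Int) :
    pvHpAux c a (l ++ [y]) = pvHpAux c a l ++ [(pvHpAux c a l).getLastD a * c + y] := by
  induction l generalizing a <;> simp [pvHpAux, pvGetLastD_cons, *]

theorem pvHp_append (c y : Int) (l : List Int) (h : l ≠ []) :
    pvHp c (l ++ [y]) = pvHp c l ++ [(pvHp c l).getLastD 0 * c + y] := by
  cases l with
  | nil => exact absurd rfl h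
  | cons a tl =>
    simp [pvHp, pvHpAux_append, List.getLastD_eq_getLast?, pvGetLastD_cons]

theorem pvHpAux_dropLast (c a : Int) (r : List Int) :
    (pvHpAux c a r).dropLast = pvHpAux c a r.dropLast := by
  induction r generalizing a with
  | nil => simp [pvHpAux]
  | cons b r ih =>
    cases r with
    | nil => simp [pvHpAux]
    | cons b2 r2 =>
      have h2 := ih (a * c + b)
      simp only [pvHpAux, List.dropLast_cons₂] at h2 ⊢
      rw [h2]

theorem pvHp_dropLast (c : Int) (p : List Int) :
    (pvHp c p).dropLast = pvHp c p.dropLast := by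
  cases p with
  | nil => simp [pvHp]
  | cons a r =>
    cases r with
    | nil => simp [pvHp, pvHpAux]
    | cons b r2 =>
      have h2 := pvHpAux_dropLast c a (b :: r2)
      simp only [pvHpAux] at h2
      simp only [pvHp, pvHpAux, List.dropLast_cons₂]
      rw [h2]

theorem pvFoldl_eq_getLastD (c a : Int) (l : List Int) :
    l.foldl (fun t x => t * c + x) a = (pvHpAux c a l).getLastD a := by
  induction l generalizing a <;> simp [pvHpAux, pvGetLastD_cons, *]

theorem getD_len_cons (l : List Int) (x d : Int) : (x :: l).getD l.length d = l.getLastD x := by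
  induction l generalizing x with
  | nil => simp [List.getD]
  | cons b r ih =>
    rw [show (b :: r).length = r.length + 1 from rfl, List.getD_cons_succ, ih,
      List.getLastD_eq_getLast?, List.getLastD_eq_getLast?, pvGetLastD_cons]

theorem pvTotal_eq (c : Int) (q : List Int) (h : q ≠ []) :
    pvTotal q c = (pvHp c q).getLastD 0 := by
  unfold pvTotal
  rw [PySem.List.foldl_pyRange_pyGetD' q 0 (fun t x => t * c + x) (PySem.List.pyGetD q 0 0) (by norm_num : (0:Int) ≤ 1)]
  cases q with
  | nil => exact absurd rfl h
  | cons x l =>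
    simp only [PySem.List.pyGetD_zero_cons, Int.toNat_one, List.drop_one, List.tail_cons]
    rw [pvFoldl_eq_getLastD]
    simp [pvHp, List.getLastD_eq_getLast?, pvGetLastD_cons]

theorem getD_cons_of_len (l : List Int) (x d : Int) (n : Nat) (h : l.length = n) :
    (x :: l).getD n d = l.getLastD x := by
  subst h; exact getD_len_cons l x d

theorem pvQfold_inv (A : List Int) (c : Int) (n : Nat) (hn : n + 1 ≤ A.length) :
    ((List.range n).map (fun (k : Nat) => (1 : Int) + (k : Int))).foldl
      (fun q i => q ++ [PySem.List.pyGetD q (i - 1) 0 * c + PySem.List.pyGetD A i 0])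
      [PySem.List.pyGetD A 0 0]
    = PySem.List.pyGetD A 0 0 :: pvHpAux c (PySem.List.pyGetD A 0 0) ((A.drop 1).take n) := by
  induction n with
  | zero => simp [pvHpAux]
  | succ m ih =>
    rw [List.range_succ, List.map_append, List.foldl_append, ih (by omega), List.map_cons,
      List.map_nil, List.foldl_cons, List.foldl_nil]
    have hlen : ((A.drop 1).take m).length = m := by
      rw [List.length_take, List.length_drop]; omega
    have hidx : (1 : Int) + (m : Int) - 1 = ((m : Nat) : Int) := by ring
    have hidx2 : (1 : Int) + (m : Int) = (((m + 1 : Nat)) : Int) := by push_cast; ring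
    rw [hidx, hidx2, PySem.List.pyGetD_natCast, PySem.List.pyGetD_natCast]
    rw [getD_cons_of_len _ _ _ _ (by rw [len_pvHpAux, hlen])]
    have htake : (A.drop 1).take (m + 1) = (A.drop 1).take m ++ [(A.drop 1).getD m 0] := by
      have hm : m < (A.drop 1).length := by rw [List.length_drop]; omega
      rw [List.getD_eq_getElem _ _ hm, ← List.take_concat_get hm]
      simp
    have hgd : A.getD (m + 1) 0 = (A.drop 1).getD m 0 := by
      have hm : m < (A.drop 1).length := by rw [List.length_drop]; omega
      have hm2 : m + 1 < A.length := by omega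
      rw [List.getD_eq_getElem _ _ hm, List.getD_eq_getElem _ _ hm2]
      simp
    rw [htake, pvHpAux_append, hgd]
    simp

theorem pvQ_eq (A : List Int) (c : Int) (h : 2 ≤ A.length) :
    pvQ A c = pvHp c A.dropLast := by
  unfold pvQ
  rw [PySem.List.pyRange_one]
  rw [show (((A.length : Int) - 1) - 1).toNat = A.length - 2 by omega]
  rw [pvQfold_inv A c (A.length - 2) (by omega)]
  cases A with
  | nil => simp at h
  | cons x r =>
    cases r with
    | nil => simp at h
    | cons b r2 =>
      simp [pvHp, List.dropLast_eq_take]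

theorem pvQ_singleton (a c : Int) : pvQ [a] c = [a] := by
  simp [pvQ, PySem.List.pyRange_one_eq_nil, PySem.List.pyGetD_zero_cons]

theorem pvALoop_eq (c : Int) (fuel : Nat) (j : Int) (p acc : List Int) :
    pvALoop c fuel j p acc = acc ++ pvOA c fuel j p := by
  induction fuel generalizing j p acc <;> simp [pvALoop, pvOA, *]

theorem len_pvStp (c : Int) (p : List Int) : (pvStp c p).length = p.length - 1 := by
  simp [pvStp, len_pvHp]

theorem pvStp_head (c : Int) (p : List Int) (h : 2 ≤ p.length) :
    (pvStp c p).headD 0 = p.headD 0 := by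
  cases p with
  | nil => simp at h
  | cons a r =>
    cases r with
    | nil => simp at h
    | cons b r2 => simp [pvStp, pvHp, pvHpAux]

theorem pvQ_eq' (p : List Int) (c : Int) (h : 2 ≤ p.length) : pvQ p c = pvStp c p := by
  rw [pvQ_eq p c h, pvStp, pvHp_dropLast]

theorem pvTV_shift (c : Int) (p : List Int) (k : Nat) :
    pvTV c (pvStp c p) k = pvTV c p (k + 1) := by
  unfold pvTV
  rw [Function.iterate_succ_apply]

theorem pvOA_spec (c : Int) (fuel : Nat) (j : Int) (p : List Int) (h : p ≠ []) :
    pvOA c fuel j p = (List.range fuel).map (fun i =>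
      (if i + 2 ≤ p.length then pvTV c p (i + 1) else p.headD 0) * pvSilnia (j + 1 + i)) := by
  induction fuel generalizing j p with
  | zero => simp [pvOA]
  | succ f ih =>
    by_cases h2 : 2 ≤ p.length
    · have hq : pvQ p c = pvStp c p := pvQ_eq' p c h2
      have hqne : pvStp c p ≠ [] := by
        have := len_pvStp c p
        intro hnil; rw [hnil] at this; simp at this; omega
      rw [pvOA, hq, ih (j + 1) _ hqne, pvTotal_eq c _ hqne]
      rw [List.range_succ_eq_map, List.map_cons, List.map_map]
      congr 1
      · have h0 : (0 : Nat) + 2 ≤ p.length := by omega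
        rw [if_pos h0]
        have : (pvHp c (pvStp c p)).getLastD 0 = pvTV c p 1 := by
          rw [← pvTV_shift c p 0]; unfold pvTV; rw [Function.iterate_zero_apply]
        rw [this]
        norm_num
      · apply List.map_congr_left
        intro i _
        simp only [Function.comp_apply]
        have hlen : (pvStp c p).length = p.length - 1 := len_pvStp c p
        have hcond : (i + 2 ≤ (pvStp c p).length) ↔ (i + 1 + 2 ≤ p.length) := by
          rw [hlen]; omega
        by_cases hc : i + 1 + 2 ≤ p.length
        · rw [if_pos (hcond.mpr hc), if_pos hc, pvTV_shift]
          congr 2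
          push_cast; ring
        · rw [if_neg (fun hx => hc (hcond.mp hx)), if_neg hc, pvStp_head c p h2]
          congr 2
          push_cast; ring
    · have h1 : p.length = 1 := by
        cases p with
        | nil => exact absurd rfl h
        | cons a r => cases r with
          | nil => rfl
          | cons b r2 => simp at h2
      obtain ⟨a, rfl⟩ : ∃ a, p = [a] := by
        cases p with
        | nil => exact absurd rfl h
        | cons a r => cases r with
          | nil => exact ⟨a, rfl⟩
          | cons b r2 => simp at h1
      have hta : pvTotal [a] c = a := by
        rw [pvTotal_eq c [a] (by simp)]; simp [pvHp, pvHpAux]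
      rw [pvOA, pvQ_singleton, hta, ih (j + 1) [a] (by simp)]
      rw [List.range_succ_eq_map, List.map_cons, List.map_map]
      congr 1
      · norm_num
      · apply List.map_congr_left
        intro i _
        simp only [Function.comp_apply, List.length_singleton]
        rw [if_neg (by omega), if_neg (by omega)]
        simp only [List.headD_cons]
        congr 2
        push_cast; ring

theorem getD_pred_eq_getLastD (l : List Int) (d : Int) (n : Nat) (h : l.length = n + 1) :
    l.getD n d = l.getLastD d := by
  cases l with
  | nil => simp at h
  | cons x l2 =>
    have hl2 : l2.length = n := by simpa using h
    rw [getD_cons_of_len l2 x d n hl2, List.getLastD_eq_getLast?, List.getLastD_eq_getLast?,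
      pvGetLastD_cons]

theorem set_append_len (X : List Int) (y v : Int) (Y : List Int) :
    (X ++ y :: Y).set X.length v = X ++ v :: Y := by
  induction X with
  | nil => simp
  | cons x X ih => simp [ih]

theorem set_append_len' (X : List Int) (y v : Int) (Y : List Int) (n : Nat)
    (h : X.length = n) : (X ++ y :: Y).set n v = X ++ v :: Y := by
  subst h; exact set_append_len X y v Y

theorem pvInnerInv (c : Int) (b : List Int) (s : Nat) (h : s + 1 ≤ b.length) :
    ((List.range s).map (fun (k : Nat) => (1 : Int) + (k : Int))).foldl
      (fun b' i => PySem.List.pySetD b' i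
        (PySem.List.pyGetD b' i 0 + c * PySem.List.pyGetD b' (i - 1) 0)) b
    = pvHp c (b.take (s + 1)) ++ b.drop (s + 1) := by
  induction s with
  | zero =>
    cases b with
    | nil => simp at h
    | cons x r => simp [pvHp, pvHpAux]
  | succ m ih =>
    rw [List.range_succ, List.map_append, List.foldl_append, ih (by omega), List.map_cons,
      List.map_nil, List.foldl_cons, List.foldl_nil]
    have hXlen : (pvHp c (b.take (m + 1))).length = m + 1 := by
      rw [len_pvHp, List.length_take]; omega
    have hm1 : m + 1 < b.length := by omega
    have hidx : (1 : Int) + (m : Int) = (((m + 1 : Nat)) : Int) := by push_cast; ring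
    have hidx2 : (((m + 1 : Nat)) : Int) - 1 = ((m : Nat) : Int) := by push_cast; ring
    rw [hidx, hidx2, PySem.List.pySetD_natCast, PySem.List.pyGetD_natCast,
      PySem.List.pyGetD_natCast]
    have hget1 : (pvHp c (b.take (m + 1)) ++ b.drop (m + 1)).getD (m + 1) 0 = b[m + 1] := by
      rw [List.getD_append_right _ _ 0 (m + 1) (by omega), hXlen]
      simp [List.getD_eq_getElem?_getD, List.getElem?_drop, hm1]
    have hget2 : (pvHp c (b.take (m + 1)) ++ b.drop (m + 1)).getD m 0
        = (pvHp c (b.take (m + 1))).getLastD 0 := by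
      rw [List.getD_append _ _ _ _ (by omega)]
      exact getD_pred_eq_getLastD _ 0 m hXlen
    rw [hget1, hget2]
    have hdrop : b.drop (m + 1) = b[m + 1] :: b.drop (m + 2) := by
      rw [List.drop_eq_getElem_cons hm1]
    rw [hdrop, set_append_len' _ _ _ _ _ hXlen]
    have htake : b.take (m + 2) = b.take (m + 1) ++ [b[m + 1]] := by
      rw [← List.take_concat_get hm1]; simp
    have hne : b.take (m + 1) ≠ [] := by
      have hl : (b.take (m + 1)).length = m + 1 := by rw [List.length_take]; omega
      intro hx; rw [hx] at hl; simp at hl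
    rw [htake, pvHp_append c _ _ hne, List.append_assoc]
    have hval : b[m + 1] + c * (pvHp c (b.take (m + 1))).getLastD 0
        = (pvHp c (b.take (m + 1))).getLastD 0 * c + b[m + 1] := by ring
    rw [hval]
    simp

theorem pvInner_eq (c : Int) (b : List Int) (bound : Int)
    (h1 : 1 ≤ bound) (h2 : bound.toNat ≤ b.length) :
    pvInner c b bound = pvHp c (b.take bound.toNat) ++ b.drop bound.toNat := by
  unfold pvInner
  rw [PySem.List.pyRange_one]
  rw [show (bound - 1).toNat = bound.toNat - 1 by omega]
  rw [pvInnerInv c b (bound.toNat - 1) (by omega)]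
  rw [show bound.toNat - 1 + 1 = bound.toNat by omega]

theorem len_iter_stp (c : Int) (A : List Int) (k : Nat) (h : k ≤ A.length) :
    ((pvStp c)^[k] A).length = A.length - k := by
  induction k with
  | zero => simp
  | succ t ih =>
    rw [Function.iterate_succ_apply', len_pvStp, ih (by omega)]
    omega

theorem pvSweepInv (A : List Int) (c : Int) (k : Nat) (hk : k ≤ A.length) :
    ((List.range k).map (fun (t : Nat) => ((t : Int)))).foldl
      (fun (st : List Int × List Int) kk =>
        let b := pvInner c st.1 ((A.length : Int) - kk)
        (b, st.2 ++ [PySem.List.pyGetD b ((A.length : Int) - 1 - kk) 0]))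
      (A, [])
    = ((pvStp c)^[k] A ++ ((List.range k).map (pvTV c A)).reverse,
       (List.range k).map (pvTV c A)) := by
  induction k with
  | zero => simp
  | succ t ih =>
    rw [List.range_succ, List.map_append, List.foldl_append, ih (by omega), List.map_cons,
      List.map_nil, List.foldl_cons, List.foldl_nil]
    simp only []
    have hlt : t < A.length := by omega
    have hlen : ((pvStp c)^[t] A).length = A.length - t := len_iter_stp c A t (by omega)
    have hrevlen : (((List.range t).map (pvTV c A)).reverse).length = t := by simp
    have hstlen : ((pvStp c)^[t] A ++ ((List.range t).map (pvTV c A)).reverse).length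
        = A.length := by
      rw [List.length_append, hlen, hrevlen]; omega
    have hbound : ((A.length : Int) - (t : Int)).toNat = A.length - t := by omega
    have hinner : pvInner c ((pvStp c)^[t] A ++ ((List.range t).map (pvTV c A)).reverse)
          ((A.length : Int) - (t : Int))
        = pvHp c ((pvStp c)^[t] A) ++ ((List.range t).map (pvTV c A)).reverse := by
      rw [pvInner_eq c _ _ (by omega) (by rw [hbound, hstlen]; omega), hbound]
      rw [List.take_append_of_le_length (by omega), List.drop_append_of_le_length (by omega)]
      rw [show A.length - t = ((pvStp c)^[t] A).length from hlen.symm]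
      simp
    rw [hinner]
    have hhplen : (pvHp c ((pvStp c)^[t] A)).length = A.length - t := by
      rw [len_pvHp]; exact hlen
    have hcoeff : PySem.List.pyGetD
          (pvHp c ((pvStp c)^[t] A) ++ ((List.range t).map (pvTV c A)).reverse)
          ((A.length : Int) - 1 - (t : Int)) 0 = pvTV c A t := by
      rw [PySem.List.pyGetD_of_nonneg _ _ (by omega)]
      rw [show ((A.length : Int) - 1 - (t : Int)).toNat = A.length - 1 - t by omega]
      rw [List.getD_append _ _ _ _ (by omega)]
      rw [getD_pred_eq_getLastD _ 0 _ (by rw [hhplen]; omega)]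
      rfl
    have hhpne : pvHp c ((pvStp c)^[t] A) ≠ [] := by
      intro hx; rw [hx] at hhplen; simp at hhplen; omega
    have hsplit : pvHp c ((pvStp c)^[t] A)
        = (pvStp c)^[t+1] A ++ [pvTV c A t] := by
      rw [Function.iterate_succ_apply']
      conv_lhs => rw [← List.dropLast_concat_getLast hhpne]
      rw [pvStp]
      congr 1
      unfold pvTV
      rw [List.getLastD_eq_getLast?, List.getLast?_eq_some_getLast hhpne]
      rfl
    rw [Prod.mk.injEq]
    constructor
    · rw [hsplit, List.append_assoc]
      congr 1
      rw [List.map_append, List.reverse_append]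
      simp
    · rw [hcoeff, List.map_append]
      simp

theorem pvSweep_eq (A : List Int) (c : Int) :
    pvSweep A c = (List.range A.length).map (pvTV c A) := by
  unfold pvSweep
  rw [PySem.List.pyRange_zero_natCast]
  rw [pvSweepInv A c A.length le_rfl]

theorem pvSilnia_zero : pvSilnia 0 = 1 := by rfl

theorem pvEmitInv (coeffs : List Int) (mI : Int) (t : Nat) :
    ((List.range t).map (fun (k : Nat) => ((k : Int)))).foldl
      (fun (st : List Int × Int) j =>
        let f := st.2 * (j + 1)
        (st.1 ++ [if j + 1 < mI then PySem.List.pyGetD coeffs (j + 1) 0 * f else 0], f))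
      ([], 1)
    = ((List.range t).map (fun (i : Nat) =>
        if (i : Int) + 1 < mI then
          PySem.List.pyGetD coeffs ((i : Int) + 1) 0 * pvSilnia ((i : Int) + 1)
        else 0),
       pvSilnia (t : Int)) := by
  induction t with
  | zero => simp [pvSilnia_zero]
  | succ m ih =>
    rw [List.range_succ, List.map_append, List.foldl_append, ih, List.map_cons,
      List.map_nil, List.foldl_cons, List.foldl_nil]
    simp only []
    rw [Prod.mk.injEq]
    have hsil : pvSilnia ((m : Int)) * ((m : Int) + 1) = pvSilnia ((m : Int) + 1) :=
      (pvSilnia_succ m).symm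
    constructor
    · rw [List.map_append, List.map_cons, List.map_nil, hsil]
    · rw [hsil]
      push_cast
      ring_nf

theorem pvAlt_eq (n : Int) (A : List Int) (c : Int) :
    HornerPochodne_alt n A c = (List.range n.toNat).map (fun (i : Nat) =>
      if (i : Int) + 1 < (A.length : Int) then
        PySem.List.pyGetD (pvSweep A c) ((i : Int) + 1) 0 * pvSilnia ((i : Int) + 1)
      else 0) := by
  unfold HornerPochodne_alt
  simp only []
  by_cases hn : 0 ≤ n
  · rw [show n = ((n.toNat : Nat) : Int) by omega, PySem.List.pyRange_zero_natCast,
      pvEmitInv (pvSweep A c) ((A.length : Int)) n.toNat]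
    simp
    congr 2
    omega
  · rw [PySem.List.pyRange_one_eq_nil (by omega), show n.toNat = 0 by omega]
    simp

-- ===== VERDICT =====

theorem pvA_repr (n : Int) (A : List Int) (c : Int) :
    HornerPochodne n A c = pvOA c n.toNat 0 A := by
  unfold HornerPochodne
  rw [pvALoop_eq]
  simp

theorem HornerPochodne_spec : Claim_unchanged_HornerPochodne := by
  intro n A c _ hpre
  unfold Spec_HornerPochodne
  intro hD
  by_cases hn : n ≤ 0
  · have h0 : n.toNat = 0 := by omega
    rw [pvA_repr, pvAlt_eq, h0]
    simp [pvOA]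
  · have hAne : A ≠ [] := by
      rcases hpre with h | h
      · omega
      · exact h
    rw [pvA_repr, pvOA_spec c n.toNat 0 A hAne, pvAlt_eq]
    apply List.map_congr_left
    intro i hi
    rw [List.mem_range] at hi
    have harg : (0 : Int) + 1 + (i : Int) = (i : Int) + 1 := by ring
    rw [harg, pvSweep_eq]
    by_cases hc : i + 2 ≤ A.length
    · rw [if_pos hc, if_pos (by push_cast; omega)]
      rw [show ((i : Int) + 1) = (((i + 1 : Nat)) : Int) by push_cast; ring,
        PySem.List.pyGetD_natCast, PySem.List.getD_map_range _ _ _ _ (by omega)]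
    · rw [if_neg hc, if_neg (by push_cast; omega)]
      have hilt : (i : Int) < n := by omega
      have hh : A.headD 0 = 0 := by
        unfold D_HornerPochodne at hD
        push_neg at hD
        by_contra hne0
        exact hne0 (hD hAne (by omega))
      rw [hh, zero_mul]

theorem HornerPochodne_changed : Claim_changed_HornerPochodne := by
  unfold Claim_changed_HornerPochodne; decide

theorem HornerPochodne_tight : Claim_exact_HornerPochodne := by
  unfold Claim_exact_HornerPochodne
  intro n A c _ hpre hD
  obtain ⟨hAne, hlen, hhead⟩ := hD
  have hApos : 0 < A.length := List.length_pos_iff.mpr hAne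
  have hn : 0 < n := by omega
  rw [pvA_repr, pvOA_spec c n.toNat 0 A hAne, pvAlt_eq]
  intro heq
  have hi0 : A.length - 1 < n.toNat := by omega
  have h := congrArg (fun l => l[A.length - 1]?) heq
  simp only [List.getElem?_map, List.getElem?_range, hi0, if_pos, Option.map_some] at h
  rw [if_neg (by omega), if_neg (by push_cast; omega), Option.some.injEq] at h
  have hs := pvSilnia_pos (0 + 1 + ((A.length - 1 : Nat) : Int))
  exact mul_ne_zero hhead (by omega) h
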